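-- pv_equiv track=rewrite | github.com/jeiros/Scripts | .ipynb_checkpoints/whatsapp-checkpoint.py | count_user_messages
-- ===== SOURCE A (Python) =====
-- def count_user_messages(lines, names_dict):
--
--     # Set all counters of names in dict to 0
--     for name in names_dict.keys():
--         names_dict[name] = 0
--
--     for line in lines:
--         for name in names_dict.keys():
--             if name in line:
--                 names_dict[name] += 1
--     return names_dict
-- ===== SOURCE B (Python) =====
-- def count_user_messages(lines, names_dict):
--     # Group identical lines once, then count each name over the distinct lines,
--     # weighting by multiplicity. (A mutates names_dict in place; B leaves it alone --
--     # equivalence is about the return value.)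
--     freq = {}
--     for line in lines:
--         freq[line] = freq.get(line, 0) + 1
--     return {name: sum(c for line, c in freq.items() if name in line)
--             for name in names_dict}
-- ===== Notes on version B (the rewrite author's own statement) =====
-- stated objective: alternative
-- what changed: Instead of mutating the dict inside a lines-by-names nested loop, B builds a frequency map of identical lines once and then counts each name over the distinct lines only, weighting by multiplicity.
import Mathlib
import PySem

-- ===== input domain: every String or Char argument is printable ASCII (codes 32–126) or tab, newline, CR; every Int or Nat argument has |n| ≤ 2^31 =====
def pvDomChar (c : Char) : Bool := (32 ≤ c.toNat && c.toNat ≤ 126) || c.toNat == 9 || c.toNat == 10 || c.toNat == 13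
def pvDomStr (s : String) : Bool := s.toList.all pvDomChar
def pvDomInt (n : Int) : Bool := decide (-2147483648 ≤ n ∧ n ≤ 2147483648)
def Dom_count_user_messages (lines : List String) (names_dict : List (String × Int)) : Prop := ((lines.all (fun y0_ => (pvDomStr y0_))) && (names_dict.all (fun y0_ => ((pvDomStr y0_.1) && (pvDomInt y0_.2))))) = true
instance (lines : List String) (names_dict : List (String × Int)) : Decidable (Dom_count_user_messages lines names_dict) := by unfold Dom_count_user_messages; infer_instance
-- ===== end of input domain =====

-- B replaces A's mutate-a-dict-per-line nested loops by grouping identical lines into a frequency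
-- map once and counting each name over the distinct lines weighted by multiplicity (objective:
-- alternative). A mutates names_dict in place; B does not — the equivalence is about the return value.


-- ===== PORT A =====
-- `for name in names_dict.keys(): names_dict[name] = 0`
def pvZero (d : PySem.Dict String Int) : PySem.Dict String Int :=
  d.keys.foldl (fun d name => d.insert name 0) d

-- body of `for line in lines`: `for name in names_dict.keys(): if name in line: names_dict[name] += 1`
def pvStep (d : PySem.Dict String Int) (line : String) : PySem.Dict String Int :=
  d.keys.foldl (fun d name => if PySem.Str.isIn name line then d.modify name 0 (· + 1) else d) d

def count_user_messages (lines : List String) (names_dict : List (String × Int)) : List (String × Int) :=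
  (lines.foldl pvStep (pvZero (PySem.Dict.ofList names_dict))).items

-- ===== PORT B =====
def count_user_messages_alt (lines : List String) (names_dict : List (String × Int)) : List (String × Int) :=
  -- freq[line] = freq.get(line, 0) + 1
  let freq := lines.foldl (fun d line => d.insert line (d.getD line 0 + 1)) PySem.Dict.empty
  -- {name: sum(c for line, c in freq.items() if name in line) for name in names_dict}
  (PySem.Dict.ofList names_dict).keys.map (fun name =>
    (name, ((freq.items.filter (fun p => PySem.Str.isIn name p.1)).map (fun p => p.2)).sum))

-- ===== PRECONDITION & SPEC =====
def Spec_count_user_messages (lines : List String) (names_dict : List (String × Int)) (out : List (String × Int)) : Prop := out = count_user_messages_alt lines names_dict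
instance (lines : List String) (names_dict : List (String × Int)) (out : List (String × Int)) : Decidable (Spec_count_user_messages lines names_dict out) := by unfold Spec_count_user_messages; infer_instance

-- ===== CLAIM (what is proved, stated in full; the proofs are below) =====
def Claim_equal_count_user_messages : Prop := ∀ (lines : List String) (names_dict : List (String × Int)), Dom_count_user_messages lines names_dict → Spec_count_user_messages lines names_dict (count_user_messages lines names_dict)

-- ===== LEMMAS AND PROOFS =====

-- folding Set.add over elements already present changes nothing
theorem pv_foldl_add_subset (l s : List String) (h : ∀ x ∈ l, x ∈ s) :
    List.foldl PySem.Set.add s l = s := by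
  induction l generalizing s with
  | nil => rfl
  | cons x l ih =>
    have hx : PySem.Set.add s x = s := by
      simp [PySem.Set.add, PySem.Set.contains, h x (by simp)]
    simpa [hx] using ih s (fun y hy => h y (by simp [hy]))

-- zeroing loop: getD after inserting 0 at every key of ks
theorem pv_zero_getD (ks : List String) (d : PySem.Dict String Int) (k : String) :
    (ks.foldl (fun d name => d.insert name 0) d).getD k 0
      = if k ∈ ks then 0 else d.getD k 0 := by
  induction ks generalizing d with
  | nil => simp
  | cons n ks ih =>
    simp only [List.foldl_cons, ih, PySem.Dict.getD_insert, List.mem_cons]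
    by_cases hk : k ∈ ks <;> by_cases he : k = n <;> simp [hk, he]

-- a conditional modify at a present key keeps the key list
theorem pv_if_modify_keys (d : PySem.Dict String Int) (n : String) (c : Bool)
    (hmem : n ∈ d.keys) :
    (if c then d.modify n 0 (· + 1) else d).keys = d.keys := by
  cases c with
  | false => rfl
  | true =>
    simp only [if_pos]
    rw [PySem.Dict.keys_modify, PySem.Dict.keys_insert_of_contains]
    exact (PySem.Dict.contains_iff_mem_keys _ _).mpr hmem

-- inner loop (one line), generic in the tested predicate: keys are unchanged
theorem pv_inner_keys (p : String → Bool) (ks : List String) (d : PySem.Dict String Int)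
    (hsub : ∀ n ∈ ks, n ∈ d.keys) :
    (ks.foldl (fun d name => if p name then d.modify name 0 (· + 1) else d) d).keys
      = d.keys := by
  induction ks generalizing d with
  | nil => rfl
  | cons n ks ih =>
    have hk := pv_if_modify_keys d n (p n) (hsub n (by simp))
    simp only [List.foldl_cons]
    rw [ih _ (fun m hm => hk ▸ hsub m (by simp [hm])), hk]

-- inner loop: getD gains 1 exactly when k is among ks and p k holds
theorem pv_inner_getD (p : String → Bool) (ks : List String) (d : PySem.Dict String Int)
    (k : String) (hnd : ks.Nodup) :
    (ks.foldl (fun d name => if p name then d.modify name 0 (· + 1) else d) d).getD k 0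
      = d.getD k 0 + (if k ∈ ks ∧ p k then 1 else 0) := by
  induction ks generalizing d with
  | nil => simp
  | cons n ks ih =>
    rcases List.nodup_cons.mp hnd with ⟨hn, hnd'⟩
    simp only [List.foldl_cons]
    rw [ih _ hnd']
    by_cases he : k = n
    · subst he
      have hnot : ¬ (k ∈ ks ∧ p k = true) := fun h => hn h.1
      simp only [hnot, if_neg, not_false_iff, add_zero, List.mem_cons, true_or, true_and]
      cases hp : p k with
      | true => simp [PySem.Dict.getD_modify_self]
      | false => simp
    · have hgd : (if p n then d.modify n 0 (· + 1) else d).getD k 0 = d.getD k 0 := by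
        cases hp : p n with
        | true => simp [PySem.Dict.getD_modify_of_ne _ _ _ he]
        | false => rfl
      rw [hgd]
      by_cases hk : k ∈ ks <;> simp [hk, he]

-- outer loop: keys unchanged, each present key counts the lines containing it
theorem pv_outer (lines : List String) (d : PySem.Dict String Int) (hnd : d.keys.Nodup) :
    (lines.foldl pvStep d).keys = d.keys ∧
      ∀ k ∈ d.keys, (lines.foldl pvStep d).getD k 0
        = d.getD k 0 + (lines.countP (fun l => PySem.Str.isIn k l) : Int) := by
  induction lines generalizing d with
  | nil => simp
  | cons line lines ih =>
    simp only [List.foldl_cons]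
    have hk : (pvStep d line).keys = d.keys :=
      pv_inner_keys (fun n => PySem.Str.isIn n line) d.keys d (fun _ h => h)
    obtain ⟨hkeys, hval⟩ := ih (pvStep d line) (hk ▸ hnd)
    refine ⟨by rw [hkeys, hk], fun k hkmem => ?_⟩
    rw [hval k (hk ▸ hkmem)]
    have hstep : (pvStep d line).getD k 0
        = d.getD k 0 + (if k ∈ d.keys ∧ PySem.Str.isIn k line then 1 else 0) :=
      pv_inner_getD (fun n => PySem.Str.isIn n line) d.keys d k hnd
    rw [hstep, List.countP_cons]
    by_cases hin : PySem.Str.isIn k line <;> simp [hin, hkmem] <;> push_cast <;> ring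

-- a 0/1 indicator summed over a duplicate-free list is a membership test
theorem pv_sum_indicator (x : String) (T : List String) (hnd : T.Nodup) :
    (T.map (fun l => if x = l then (1:Int) else 0)).sum = if x ∈ T then 1 else 0 := by
  induction T with
  | nil => simp
  | cons y T ih =>
    rcases List.nodup_cons.mp hnd with ⟨hy, hnd'⟩
    by_cases he : x = y
    · subst he
      simp [ih hnd', hy]
    · simp [he, ih hnd', Ne.symm he]

-- the multiplicity-weighted sum over distinct elements equals countP
theorem pv_sum_count (p : String → Bool) (xs S : List String) (hnd : S.Nodup)
    (hsub : ∀ l ∈ xs, l ∈ S) :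
    ((S.filter p).map (fun l => (List.count l xs : Int))).sum = (xs.countP p : Int) := by
  induction xs with
  | nil => simp
  | cons x xs ih =>
    have hsub' : ∀ l ∈ xs, l ∈ S := fun l hl => hsub l (by simp [hl])
    have hcnt : ∀ l : String, (List.count l (x :: xs) : Int)
        = (List.count l xs : Int) + (if x = l then 1 else 0) := by
      intro l
      by_cases he : l = x
      · subst he
        rw [List.count_cons_self, if_pos rfl]
        push_cast ; ring
      · rw [List.count_cons_of_ne (fun h => he h.symm), if_neg (fun h => he h.symm)]
        simp
    calc ((S.filter p).map (fun l => (List.count l (x :: xs) : Int))).sum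
        = ((S.filter p).map
            (fun l => (List.count l xs : Int) + (if x = l then 1 else 0))).sum := by
          simp only [hcnt]
      _ = ((S.filter p).map (fun l => (List.count l xs : Int))).sum
            + ((S.filter p).map (fun l => (if x = l then (1:Int) else 0))).sum := by
          rw [← List.sum_map_add]
      _ = (xs.countP p : Int) + (if x ∈ S.filter p then (1:Int) else 0) := by
          rw [ih hsub', pv_sum_indicator x (S.filter p) (hnd.filter p)]
      _ = ((x :: xs).countP p : Int) := by
          rw [List.countP_cons]
          by_cases hp : p x
          · rw [if_pos (List.mem_filter.mpr ⟨hsub x (by simp), hp⟩), if_pos hp]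
            push_cast ; ring
          · rw [if_neg (fun h => hp (List.mem_filter.mp h).2), if_neg hp]
            simp

-- ===== VERDICT (by name: the statement is the Claim_ definition above) =====
theorem count_user_messages_spec : Claim_equal_count_user_messages := by
  intro lines names_dict _
  unfold Spec_count_user_messages count_user_messages count_user_messages_alt
  have hnd0 : (PySem.Dict.ofList names_dict).keys.Nodup :=
    PySem.Dict.nodup_keys_ofList names_dict
  set d0 := PySem.Dict.ofList names_dict with hd0
  -- the zeroing pass keeps the keys
  have hzkeys : (pvZero d0).keys = d0.keys := by
    unfold pvZero
    rw [PySem.Dict.keys_foldl_insert d0.keys (fun _ _ => 0) d0]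
    exact pv_foldl_add_subset d0.keys d0.keys (fun _ h => h)
  -- and zeroes every present key
  have hzval : ∀ k ∈ d0.keys, (pvZero d0).getD k 0 = 0 := by
    intro k hk
    unfold pvZero
    rw [pv_zero_getD]
    simp [hk]
  obtain ⟨hkeys, hval⟩ := pv_outer lines (pvZero d0) (hzkeys ▸ hnd0)
  -- A's items as a map over the (unchanged) key list
  rw [PySem.Dict.items_eq_map_keys _ (hkeys ▸ hzkeys ▸ hnd0) 0, hkeys, hzkeys]
  -- B's frequency dict is the counter of the lines
  rw [show lines.foldl (fun d line => d.insert line (d.getD line 0 + 1)) PySem.Dict.empty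
        = PySem.Dict.counter lines from PySem.Dict.foldl_insert_getD_add_one_eq_counter lines]
  apply List.map_congr_left
  intro k hk
  have hA : (lines.foldl pvStep (pvZero d0)).getD k 0
      = (lines.countP (fun l => PySem.Str.isIn k l) : Int) := by
    rw [hval k (hzkeys ▸ hk), hzval k hk, zero_add]
  rw [hA, PySem.Dict.items_counter, List.filter_map, List.map_map]
  have : ((PySem.Set.ofList lines).filter
        ((fun p => PySem.Str.isIn k p.1) ∘ fun l => (l, (List.count l lines : Int)))).map
          ((fun p => p.2) ∘ fun l => (l, (List.count l lines : Int)))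
      = ((PySem.Set.ofList lines).filter (fun l => PySem.Str.isIn k l)).map
          (fun l => (List.count l lines : Int)) := by
    rfl
  rw [this, pv_sum_count (fun l => PySem.Str.isIn k l) lines (PySem.Set.ofList lines)
        (PySem.Set.nodup_ofList lines) (fun l hl => (PySem.Set.mem_ofList lines l).mpr hl)]
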